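-- pv_equiv track=rewrite | github.com/sarveshgulgulia90/Pentration-Tool | Project/detecter/sql_detecter.py | contains_sql_error
-- ===== SOURCE A (Python) =====
-- SQL_ERROR_SIGNS = [
--     "you have an error in your sql syntax",
--     "warning: mysql",
--     "unclosed quotation mark after the character string",
--     "sql syntax",
--     "mysql_fetch",
--     "syntax error",
--     "pg_query",
--     "odbc"
-- ]
--
-- def contains_sql_error(text):
--     if not text:
--         return False
--     low = text.lower()
--     for sig in SQL_ERROR_SIGNS:
--         if sig in low:
--             return True
--     return False
-- ===== SOURCE B (Python) =====
-- SQL_ERROR_SIGNS = [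
--     "you have an error in your sql syntax",
--     "warning: mysql",
--     "unclosed quotation mark after the character string",
--     "sql syntax",
--     "mysql_fetch",
--     "syntax error",
--     "pg_query",
--     "odbc"
-- ]
--
-- def contains_sql_error(text):
--     if not text:
--         return False
--     low = text.lower()
--     # one left-to-right pass over positions: at each position test every signature
--     for i in range(len(low) + 1):
--         if any(low.startswith(sig, i) for sig in SQL_ERROR_SIGNS):
--             return True
--     return False
-- ===== Notes on version B (the rewrite author's own statement) =====
-- stated objective: alternative
-- what changed: A scans the text once per signature (signature-major, eight substring searches); B makes a single position-major pass over the text, testing all signatures as prefixes at each position, mirroring how a combined-automaton/regex matcher traverses the input once.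
import Mathlib
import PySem

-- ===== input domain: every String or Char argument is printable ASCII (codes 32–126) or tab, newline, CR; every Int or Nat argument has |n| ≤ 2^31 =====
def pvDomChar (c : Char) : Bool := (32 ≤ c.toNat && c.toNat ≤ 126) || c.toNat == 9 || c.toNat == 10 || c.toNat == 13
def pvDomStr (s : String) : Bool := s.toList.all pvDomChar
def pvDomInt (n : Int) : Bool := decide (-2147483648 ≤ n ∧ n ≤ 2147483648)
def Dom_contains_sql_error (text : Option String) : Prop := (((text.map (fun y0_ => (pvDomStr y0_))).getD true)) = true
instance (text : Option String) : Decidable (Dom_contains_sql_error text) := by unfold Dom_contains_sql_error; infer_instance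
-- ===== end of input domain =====

-- B replaces A's signature-major loop (one substring scan per signature) by a single
-- position-major pass testing all signatures as prefixes at each position; alternative, same cost class.

-- module-level constant shared by both Pythons
def SQL_ERROR_SIGNS : List String :=
  [ "you have an error in your sql syntax",
    "warning: mysql",
    "unclosed quotation mark after the character string",
    "sql syntax",
    "mysql_fetch",
    "syntax error",
    "pg_query",
    "odbc" ]

-- ===== PORT A =====
-- 'for sig in SQL_ERROR_SIGNS: if sig in low: return True' / 'return False'
def aLoop : List String → String → Bool
  | [], _ => false
  | sig :: rest, low => if PySem.Str.isIn sig low then true else aLoop rest low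

def contains_sql_error (text : Option String) : Bool :=
  match text with
  | none => false                    -- 'if not text: return False' (None is falsy)
  | some s =>
    if s.toList = [] then false      -- '' is falsy
    else aLoop SQL_ERROR_SIGNS (PySem.Str.lower s)

-- ===== PORT B =====
-- 'for i in range(len(low)+1): if any(low.startswith(sig, i) …): return True' — one pass over
-- suffixes of low (low.startswith(sig, i) = sig is a prefix of the suffix starting at i; exact here
-- since 0 ≤ i ≤ len(low)).
def bScan (sigs : List String) : List Char → Bool
  | [] => sigs.any (fun sig => sig.toList.isPrefixOf [])
  | c :: t =>
    if sigs.any (fun sig => sig.toList.isPrefixOf (c :: t)) then true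
    else bScan sigs t

def contains_sql_error_alt (text : Option String) : Bool :=
  match text with
  | none => false
  | some s =>
    if s.toList = [] then false
    else bScan SQL_ERROR_SIGNS (PySem.Str.lower s).toList

-- ===== PRECONDITION & SPEC =====
def Spec_contains_sql_error (text : Option String) (out : Bool) : Prop := out = contains_sql_error_alt text
instance (text : Option String) (out : Bool) : Decidable (Spec_contains_sql_error text out) := by unfold Spec_contains_sql_error; infer_instance

-- ===== CLAIM (what is proved, stated in full; the proofs are below) =====
def Claim_equal_contains_sql_error : Prop := ∀ (text : Option String), Dom_contains_sql_error text → Spec_contains_sql_error text (contains_sql_error text)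

-- ===== LEMMAS AND PROOFS =====

-- B's scan returns true iff some signature is a prefix of some suffix
theorem bScan_eq_true_iff (sigs : List String) (l : List Char) :
    bScan sigs l = true ↔ ∃ j, ∃ sig ∈ sigs, sig.toList <+: l.drop j := by
  induction l with
  | nil =>
    simp only [bScan, List.any_eq_true, List.isPrefixOf_iff_prefix]
    constructor
    · rintro ⟨sig, hs, hp⟩; exact ⟨0, sig, hs, by simpa using hp⟩
    · rintro ⟨j, sig, hs, hp⟩; exact ⟨sig, hs, by simpa using hp⟩
  | cons c t ih =>
    simp only [bScan]
    split_ifs with h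
    · simp only [true_iff]
      rcases List.any_eq_true.mp h with ⟨sig, hs, hp⟩
      exact ⟨0, sig, hs, by simpa using List.isPrefixOf_iff_prefix.mp hp⟩
    · rw [ih]
      constructor
      · rintro ⟨j, sig, hs, hp⟩; exact ⟨j + 1, sig, hs, by simpa using hp⟩
      · rintro ⟨j, sig, hs, hp⟩
        cases j with
        | zero =>
          exfalso
          exact h (List.any_eq_true.mpr ⟨sig, hs, List.isPrefixOf_iff_prefix.mpr (by simpa using hp)⟩)
        | succ j => exact ⟨j, sig, hs, by simpa using hp⟩

-- A's loop returns true iff some signature is a substring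
theorem aLoop_eq_true_iff (sigs : List String) (low : String) :
    aLoop sigs low = true ↔ ∃ sig ∈ sigs, PySem.Str.isIn sig low = true := by
  induction sigs with
  | nil => simp [aLoop]
  | cons sig rest ih =>
    simp only [aLoop]
    split_ifs with h
    · simp [PySem.Str.isIn_eq] at h
      simp [h]
    · rw [ih]
      constructor
      · rintro ⟨s, hs, hi⟩; exact ⟨s, List.mem_cons_of_mem _ hs, hi⟩
      · rintro ⟨s, hs, hi⟩
        rcases List.mem_cons.mp hs with rfl | hs'
        · exact absurd hi h
        · exact ⟨s, hs', hi⟩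

theorem aLoop_eq_bScan (sigs : List String) (low : String) :
    aLoop sigs low = bScan sigs low.toList := by
  rcases hb : bScan sigs low.toList with _ | _
  · rcases ha : aLoop sigs low with _ | _
    · rfl
    · exfalso
      rcases (aLoop_eq_true_iff sigs low).mp ha with ⟨sig, hs, hi⟩
      have hinf := (PySem.Str.isIn_iff_infix sig low).mp hi
      rcases List.infix_iff_prefix_suffix.mp hinf with ⟨t, hpre, hsuf⟩
      rcases hsuf with ⟨pre, heq⟩
      have hdrop : sig.toList <+: low.toList.drop pre.length := by
        rw [← heq]; simpa [List.drop_left] using hpre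
      have : bScan sigs low.toList = true :=
        (bScan_eq_true_iff sigs _).mpr ⟨pre.length, sig, hs, hdrop⟩
      simp [hb] at this
  · rcases (bScan_eq_true_iff sigs low.toList).mp hb with ⟨j, sig, hs, hp⟩
    have hinf : sig.toList <:+: low.toList :=
      List.infix_iff_prefix_suffix.mpr ⟨low.toList.drop j, hp, List.drop_suffix _ _⟩
    have := (aLoop_eq_true_iff sigs low).mpr ⟨sig, hs, (PySem.Str.isIn_iff_infix sig low).mpr hinf⟩
    simp [this]

-- ===== VERDICT (by name: the statement is the Claim_ definition above) =====
theorem contains_sql_error_spec : Claim_equal_contains_sql_error := by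
  intro text _
  unfold Spec_contains_sql_error contains_sql_error contains_sql_error_alt
  cases text with
  | none => rfl
  | some s =>
    simp only
    split_ifs with h
    · rfl
    · exact aLoop_eq_bScan SQL_ERROR_SIGNS (PySem.Str.lower s)
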